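-- pv_equiv track=rewrite | github.com/josmet52/fet_elt_epub | prg/fet_lib.py | make_one_string
-- ===== SOURCE A (Python) =====
-- def make_one_string(xml_str_in):
--     """
--     make one continus string with xml
--     and remove somme characters
--     """
--     xml_str_out = ""
--     for l in xml_str_in:
--         xml_str_out += l \
--             .replace("\n", "") \
--             .replace("\t", "") \
--             .replace("\u200b", "")
--     return xml_str_out
-- ===== SOURCE B (Python) =====
-- def make_one_string(xml_str_in):
--     """Join first, then strip the unwanted characters with three whole-string replaces."""
--     s = ''.join(xml_str_in)
--     return s.replace('\n', '').replace('\t', '').replace('\u200b', '')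
-- ===== Notes on version B (the rewrite author's own statement) =====
-- stated objective: faster
-- what changed: B joins the input into one string first and then performs the three character removals as whole-string replaces in a single expression, instead of A's loop that calls replace three times on each one-character slice and accumulates with +=.
import Mathlib
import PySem

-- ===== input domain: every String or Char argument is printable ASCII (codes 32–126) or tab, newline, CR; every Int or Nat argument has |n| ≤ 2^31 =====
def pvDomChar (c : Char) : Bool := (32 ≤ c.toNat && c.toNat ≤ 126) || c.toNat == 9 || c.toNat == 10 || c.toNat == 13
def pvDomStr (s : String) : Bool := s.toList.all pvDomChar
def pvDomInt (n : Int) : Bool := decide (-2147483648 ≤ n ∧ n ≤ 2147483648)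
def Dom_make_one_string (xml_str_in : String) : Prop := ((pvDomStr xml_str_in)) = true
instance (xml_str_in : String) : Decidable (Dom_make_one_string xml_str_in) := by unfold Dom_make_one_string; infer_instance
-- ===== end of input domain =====

-- B joins the input into one string first and then removes '\n', '\t', '\u200b' with three
-- whole-string replaces, instead of A's per-character replace-then-+= accumulation loop (simpler).

-- ===== PORT A =====
-- for l in xml_str_in: xml_str_out += l.replace("\n","").replace("\t","").replace("\u200b","")
def make_one_string (xml_str_in : String) : String :=
  xml_str_in.toList.foldl
    (fun xml_str_out l =>
      xml_str_out ++
        (PySem.Str.replace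
          (PySem.Str.replace
            (PySem.Str.replace (String.ofList [l]) "\n" "") "\t" "") "\u200B" ""))
    ""

-- ===== PORT B =====
-- s = ''.join(xml_str_in); return s.replace('\n','').replace('\t','').replace('\u200b','')
def make_one_string_alt (xml_str_in : String) : String :=
  let s := PySem.Str.join "" (xml_str_in.toList.map (fun c => String.ofList [c]))
  PySem.Str.replace (PySem.Str.replace (PySem.Str.replace s "\n" "") "\t" "") "\u200B" ""

-- ===== PRECONDITION & SPEC =====
def Spec_make_one_string (xml_str_in : String) (out : String) : Prop := out = make_one_string_alt xml_str_in
instance (xml_str_in : String) (out : String) : Decidable (Spec_make_one_string xml_str_in out) := by unfold Spec_make_one_string; infer_instance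

-- ===== CLAIM (what is proved, stated in full; the proofs are below) =====
def Claim_equal_make_one_string : Prop := ∀ (xml_str_in : String), Dom_make_one_string xml_str_in → Spec_make_one_string xml_str_in (make_one_string xml_str_in)

-- ===== LEMMAS AND PROOFS =====

-- replace with a one-character pattern and empty replacement is a filter
theorem replace_go_filter (c : Char) : ∀ (l : List Char) (fuel : Nat) (acc : List Char),
    l.length ≤ fuel →
    PySem.Chars.replace.go [c] [] fuel l acc = acc.reverse ++ l.filter (fun x => x != c) := by
  intro l
  induction l with
  | nil =>
    intro fuel acc _
    cases fuel <;> simp [PySem.Chars.replace.go]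
  | cons c' t ih =>
    intro fuel acc h
    cases fuel with
    | zero => simp at h
    | succ fuel =>
      by_cases hc : c = c'
      · subst hc
        simp only [PySem.Chars.replace.go, List.isPrefixOf, beq_self_eq_true, Bool.true_and,
          List.length_cons, List.drop_succ_cons, if_true, List.length_nil, List.drop_zero,
          List.reverse_nil, List.nil_append]
        rw [ih fuel acc (by simpa using h)]
        simp
      · have hpre : [c].isPrefixOf (c' :: t) = false := by
          simp [List.isPrefixOf, hc]
        simp only [PySem.Chars.replace.go, hpre, Bool.false_eq_true, if_false]
        rw [ih fuel (c' :: acc) (by simpa using h)]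
        simp [Ne.symm hc]

theorem replace_filter (c : Char) (cs : List Char) :
    PySem.Chars.replace cs [c] [] = cs.filter (fun x => x != c) := by
  simp only [PySem.Chars.replace, List.isEmpty_cons, Bool.false_eq_true, if_false]
  exact replace_go_filter c cs cs.length [] le_rfl

-- concatenating the per-character triple filters is the triple filter of the whole list
theorem flatMap_filter3 (p1 p2 p3 : Char → Bool) (cs : List Char) :
    cs.flatMap (fun c => (([c].filter p1).filter p2).filter p3)
      = ((cs.filter p1).filter p2).filter p3 := by
  induction cs with
  | nil => rfl
  | cons c t ih =>
    rw [List.flatMap_cons, ih]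
    by_cases h1 : p1 c <;> by_cases h2 : p2 c <;> by_cases h3 : p3 c <;>
      simp only [List.filter_cons, h1, h2, h3, if_true, if_false, Bool.false_eq_true,
        List.filter_nil, List.nil_append, List.cons_append]

theorem fold_toList (f : Char → String) (l : List Char) (acc : String) :
    (l.foldl (fun s c => s ++ f c) acc).toList
      = acc.toList ++ l.flatMap (fun c => (f c).toList) := by
  induction l generalizing acc with
  | nil => simp
  | cons c t ih => simp [List.foldl_cons, ih]

-- ===== VERDICT (by name: the statement is the Claim_ definition above) =====
theorem make_one_string_spec : Claim_equal_make_one_string := by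
  intro s _
  unfold Spec_make_one_string make_one_string make_one_string_alt
  apply String.ext
  rw [fold_toList]
  have hn : ("\n" : String).toList = ['\n'] := rfl
  have ht : ("\t" : String).toList = ['\t'] := rfl
  have hz : ("\u200B" : String).toList = ['\u200B'] := rfl
  have he : ("" : String).toList = [] := rfl
  simp only [PySem.Str.toList_replace, PySem.Str.toList_join, hn, ht, hz, he,
    String.toList_ofList, replace_filter]
  have hjoin : PySem.Chars.join []
      (List.map String.toList (List.map (fun c => String.ofList [c]) s.toList)) = s.toList := by
    rw [List.map_map]
    have hmap : (String.toList ∘ fun c => String.ofList [c]) = fun c => [c] := by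
      funext c; simp
    rw [hmap]
    exact PySem.Chars.join_nil_singletons s.toList
  rw [hjoin, List.nil_append]
  exact flatMap_filter3 (fun x => x != '\n') (fun x => x != '\t') (fun x => x != '\u200B') s.toList
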